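-- pv_equiv track=rewrite | github.com/OnlyPaul/PySliceplorer | pysliceplorer/hypersliceplorer.py | generate_simplices
-- ===== SOURCE A (Python) =====
-- def transpose(mat, nc, nr):
--     ret = [None]*len(mat)
--     for row in range(0, nc):
--         for col in range(0, nr):
--             ret[nr*row + col] = mat[nc*col + row]
--     return ret
--
-- def generate_simplices(vertices, config):
--     ret = []
--     for row in config:
--         simp = []
--         for col in row:
--             simp = simp + vertices[col]
--         # The simplex needs to be transposed due to different data structure in Rust core.
--         # The code here delivers correct aligned matrix in Rust
--         ret.append(transpose(simp, len(vertices[0]), len(config[0])))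
--     return ret
-- ===== SOURCE B (Python) =====
-- def generate_simplices(vertices, config):
--     # Direct component-major construction: no flat concat buffer, no None
--     # pre-fill, no index-arithmetic transpose helper.
--     out = []
--     for row in config:
--         nc = len(vertices[0])
--         nr = len(config[0])
--         t = []
--         for i in range(nc):
--             for j in range(nr):
--                 t.append(vertices[row[j]][i])
--         out.append(t)
--     return out
-- ===== Notes on version B (the rewrite author's own statement) =====
-- stated objective: alternative
-- what changed: Drops the flat concatenate-then-transpose pipeline (repeated list concatenation into a buffer, None pre-fill, index-arithmetic transpose helper) and builds each output row directly in component-major order with one nested loop over vertices[row[j]][i].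
-- outside the precondition, e.g. on generate_simplices([[-5], [], [2, 1, 2]], [[1, -1, 1]]): A returns [[2, 1, 2]], B raises IndexError; on generate_simplices([[1], [2]], [[0], [0, 1]]): A returns [[1], [1, None]], B returns [[1], [1]]
import Mathlib
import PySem

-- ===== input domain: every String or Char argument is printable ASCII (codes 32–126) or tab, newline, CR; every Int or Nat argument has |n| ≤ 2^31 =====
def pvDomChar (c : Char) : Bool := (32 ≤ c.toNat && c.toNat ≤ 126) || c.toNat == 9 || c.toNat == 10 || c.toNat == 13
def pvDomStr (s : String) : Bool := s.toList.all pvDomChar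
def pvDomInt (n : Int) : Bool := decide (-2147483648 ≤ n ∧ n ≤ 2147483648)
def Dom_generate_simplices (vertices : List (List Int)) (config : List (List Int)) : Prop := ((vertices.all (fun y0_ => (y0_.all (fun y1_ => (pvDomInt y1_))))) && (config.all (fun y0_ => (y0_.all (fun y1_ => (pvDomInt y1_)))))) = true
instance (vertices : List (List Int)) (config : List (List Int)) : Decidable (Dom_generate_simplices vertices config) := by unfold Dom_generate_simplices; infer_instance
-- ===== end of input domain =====

-- B builds each transposed simplex row directly in component-major order (one nested
-- loop over vertices[row[j]][i]) instead of A's concatenate-into-a-flat-buffer followed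
-- by an index-arithmetic transpose helper over a None-prefilled list (objective:
-- alternative — it avoids the intermediate flat buffer).


-- ===== PORT A =====
-- transpose(mat, nc, nr): ret = [None]*len(mat) is ported as a replicate of the
-- placeholder 0 — inside Pre_ every cell of ret is overwritten, so the placeholder is
-- never visible (a leftover None would make A's result leave the type List (List Int),
-- and such inputs are outside Pre_).  ret[..] = .. uses pySetD and mat[..] uses pyGetD:
-- the out-of-range cases (IndexError in Python) only occur outside Pre_.
def transposeA (mat : List Int) (nc nr : Int) : List Int :=
  (PySem.List.pyRange 0 nc 1).foldl (fun ret r =>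
    (PySem.List.pyRange 0 nr 1).foldl (fun ret c =>
      PySem.List.pySetD ret (nr * r + c) (PySem.List.pyGetD mat (nc * c + r) 0)) ret)
    (List.replicate mat.length 0)

-- vertices[col] and vertices[0] use pyGetD with default []: the IndexError cases
-- (col out of range, vertices = [] while config ≠ []) are outside Pre_.
def generate_simplices (vertices : List (List Int)) (config : List (List Int)) : List (List Int) :=
  config.foldl (fun ret row =>
    let simp := row.foldl (fun s col => s ++ PySem.List.pyGetD vertices col []) []
    ret ++ [transposeA simp ((vertices.headD []).length : Int) ((config.headD []).length : Int)]) []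

-- ===== PORT B =====
-- same pyGetD convention: every lookup that would raise IndexError in Python is outside Pre_.
def generate_simplices_alt (vertices : List (List Int)) (config : List (List Int)) : List (List Int) :=
  config.foldl (fun out row =>
    let nc : Int := ((vertices.headD []).length : Int)
    let nr : Int := ((config.headD []).length : Int)
    let t := (PySem.List.pyRange 0 nc 1).foldl (fun t i =>
      (PySem.List.pyRange 0 nr 1).foldl (fun t j =>
        t ++ [PySem.List.pyGetD (PySem.List.pyGetD vertices (PySem.List.pyGetD row j 0) []) i 0]) t) []
    out ++ [t]) []

-- ===== PRECONDITION & SPEC =====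
-- Pre_ excludes the inputs where A raises (IndexError: invalid vertex index, empty
-- vertices with nonempty config, a too-short config row) and the inputs where a
-- referenced vertex row's length differs from len(vertices[0]) or a config row is
-- ragged, on which A either raises, returns a list still containing None (not a value
-- of the declared type), or returns a misaligned transpose of the flat buffer at which
-- B's natural per-element indexing raises IndexError.
def Pre_generate_simplices (vertices : List (List Int)) (config : List (List Int)) : Prop :=
  config = [] ∨
    (vertices ≠ [] ∧ ∀ r ∈ config,
      ((vertices.headD []).length = 0 ∨ (config.headD []).length = 0 ∨
        r.length = (config.headD []).length) ∧
      ∀ c ∈ r, (PySem.List.pyGet? vertices c).map List.length =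
        some (if (config.headD []).length = 0 then 0 else (vertices.headD []).length))

instance (vertices : List (List Int)) (config : List (List Int)) : Decidable (Pre_generate_simplices vertices config) := by
  unfold Pre_generate_simplices; infer_instance

def pvWitness_generate_simplices : List (List Int) × List (List Int) :=
  ([[1, 2], [3, 4]], [[0, 1], [1, 0]])

def Spec_generate_simplices (vertices : List (List Int)) (config : List (List Int)) (out : List (List Int)) : Prop := out = generate_simplices_alt vertices config
instance (vertices : List (List Int)) (config : List (List Int)) (out : List (List Int)) : Decidable (Spec_generate_simplices vertices config out) := by unfold Spec_generate_simplices; infer_instance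

-- ===== CLAIM (what is proved, stated in full; the proofs are below) =====
def Claim_equal_generate_simplices : Prop := ∀ (vertices : List (List Int)) (config : List (List Int)), Dom_generate_simplices vertices config → Pre_generate_simplices vertices config → Spec_generate_simplices vertices config (generate_simplices vertices config)

-- ===== LEMMAS AND PROOFS =====

-- length is preserved by the inner fill loop of A's transpose
theorem fillInner_length (R base : Nat) (f : Nat → Int) (l : List Int) :
    ((List.range R).foldl (fun ret j => ret.set (base + j) (f j)) l).length = l.length := by
  induction R generalizing l with
  | zero => simp
  | succ R ih => simp [List.range_succ, List.foldl_append, ih]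

-- the inner fill loop writes f j at position base + j (j < R) and leaves the rest
theorem fillInner_getElem? (R base : Nat) (f : Nat → Int) (l : List Int) (q : Nat) :
    ((List.range R).foldl (fun ret j => ret.set (base + j) (f j)) l)[q]? =
      if base ≤ q ∧ q < base + R ∧ q < l.length then some (f (q - base)) else l[q]? := by
  induction R with
  | zero => simp; omega
  | succ R ih =>
      rw [List.range_succ, List.foldl_append]
      simp only [List.foldl_cons, List.foldl_nil]
      rw [List.getElem?_set, fillInner_length]
      by_cases hq : base + R = q
      · subst hq
        by_cases hl : base + R < l.length
        · rw [if_pos rfl, if_pos hl, if_pos ⟨by omega, by omega, hl⟩]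
          have : base + R - base = R := by omega
          rw [this]
        · rw [if_pos rfl, if_neg hl,
            if_neg (by omega : ¬(base ≤ base + R ∧ base + R < base + (R + 1) ∧ base + R < l.length))]
          exact (List.getElem?_eq_none (by omega)).symm
      · rw [if_neg hq, ih]
        split_ifs <;> first | rfl | omega

theorem fillOuter_length (N R : Nat) (v : Nat → Nat → Int) (l : List Int) :
    ((List.range N).foldl (fun ret i => (List.range R).foldl
      (fun ret j => ret.set (R * i + j) (v i j)) ret) l).length = l.length := by
  induction N generalizing l with
  | zero => simp
  | succ N ih => simp [List.range_succ, List.foldl_append, ih, fillInner_length]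

-- after M outer iterations the first R*M cells hold their final values
theorem fillOuter_getElem? (N R : Nat) (v : Nat → Nat → Int) (l : List Int)
    (hlen : l.length = R * N) (M : Nat) (hM : M ≤ N) (q : Nat) :
    ((List.range M).foldl (fun ret i => (List.range R).foldl
      (fun ret j => ret.set (R * i + j) (v i j)) ret) l)[q]? =
      if q < R * M then some (v (q / R) (q % R)) else l[q]? := by
  induction M with
  | zero => simp
  | succ M ih =>
      rw [List.range_succ, List.foldl_append]
      simp only [List.foldl_cons, List.foldl_nil]
      rw [fillInner_getElem? R (R * M) (fun j => v M j) _ q, fillOuter_length, ih (by omega)]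
      have hR : R * M + R = R * (M + 1) := by ring
      have hle : R * (M + 1) ≤ R * N := Nat.mul_le_mul_left R hM
      by_cases h1 : R * M ≤ q ∧ q < R * M + R
      · have hRpos : 0 < R := by omega
        have hqd : q / R = M := by
          have h2 : q = R * M + (q - R * M) := by omega
          rw [h2, Nat.mul_add_div hRpos, Nat.div_eq_of_lt (by omega), Nat.add_zero]
        have hqm : q % R = q - R * M := by
          conv_lhs => rw [(by omega : q = R * M + (q - R * M))]
          rw [Nat.mul_add_mod, Nat.mod_eq_of_lt (by omega)]
        rw [if_pos ⟨h1.1, by omega, by omega⟩, if_pos (by omega)]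
        rw [hqd, hqm]
      · rw [if_neg (by omega)]
        split_ifs <;> first | rfl | omega

-- the component-major flatMap has the same cells
theorem flatMapBlocks_getElem? (N R : Nat) (v : Nat → Nat → Int) (q : Nat) :
    ((List.range N).flatMap (fun i => (List.range R).map (fun j => v i j)))[q]? =
      if q < R * N then some (v (q / R) (q % R)) else none := by
  induction N with
  | zero => simp
  | succ N ih =>
      rw [List.range_succ, List.flatMap_append]
      have e1 : R * (N + 1) = R * N + R := by ring
      have hlen : ((List.range N).flatMap (fun i => (List.range R).map (fun j => v i j))).length = R * N := by
        simp [List.length_flatMap, mul_comm]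
      by_cases h1 : q < R * N
      · rw [List.getElem?_append_left (by omega), ih, if_pos h1, if_pos (by omega)]
      · rw [List.getElem?_append_right (by omega), hlen]
        simp only [List.flatMap_cons, List.flatMap_nil, List.append_nil]
        by_cases h2 : q < R * (N + 1)
        · have hRpos : 0 < R := by omega
          rw [List.getElem?_map, List.getElem?_range (by omega)]
          have hqd : q / R = N := by
            rw [(by omega : q = R * N + (q - R * N)), Nat.mul_add_div hRpos,
              Nat.div_eq_of_lt (by omega), Nat.add_zero]
          have hqm : q % R = q - R * N := by
            conv_lhs => rw [(by omega : q = R * N + (q - R * N))]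
            rw [Nat.mul_add_mod, Nat.mod_eq_of_lt (by omega)]
          rw [if_pos h2]
          simp [hqd, hqm]
        · rw [if_neg h2]
          simp only [List.getElem?_map]
          rw [List.getElem?_eq_none (by simp; omega)]
          rfl

-- master shape lemma: position-by-position filling of a length-(R*N) buffer is a
-- component-major flatMap
theorem fillOuter_eq_flatMap (N R : Nat) (v : Nat → Nat → Int) (l : List Int)
    (hlen : l.length = R * N) :
    ((List.range N).foldl (fun ret i => (List.range R).foldl
      (fun ret j => ret.set (R * i + j) (v i j)) ret) l) =
    (List.range N).flatMap (fun i => (List.range R).map (fun j => v i j)) := by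
  apply List.ext_getElem?_iff.mpr
  intro q
  rw [fillOuter_getElem? N R v l hlen N (le_refl N) q, flatMapBlocks_getElem?]
  split_ifs with h
  · rfl
  · exact List.getElem?_eq_none (by omega)

-- length of a flatMap with uniform block length
theorem length_flatMap_uniform (g : Int → List Int) (row : List Int) (K : Nat)
    (h : ∀ c ∈ row, (g c).length = K) :
    (row.flatMap g).length = row.length * K := by
  induction row with
  | nil => simp
  | cons c row ih =>
      simp only [List.flatMap_cons, List.length_append, List.length_cons]
      rw [h c (by simp), ih (fun c hc => h c (by simp [hc]))]; ring

-- indexing into a flatMap with uniform block length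
theorem getD_flatMap_uniform (g : Int → List Int) (row : List Int) (K : Nat)
    (h : ∀ c ∈ row, (g c).length = K) (j i : Nat) (hj : j < row.length) (hi : i < K) :
    (row.flatMap g).getD (K * j + i) 0 = (g (row[j])).getD i 0 := by
  induction row generalizing j with
  | nil => simp at hj
  | cons c row ih =>
      cases j with
      | zero =>
          simp only [List.flatMap_cons, Nat.mul_zero, Nat.zero_add, List.getElem_cons_zero]
          rw [List.getD_append _ _ _ _ (by rw [h c (by simp)]; omega)]
      | succ j =>
          simp only [List.flatMap_cons, List.getElem_cons_succ]
          have hlen : (g c).length = K := h c (by simp)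
          have e1 : K * (j + 1) + i = (g c).length + (K * j + i) := by rw [hlen]; ring
          rw [e1, List.getD_append_right _ _ _ _ (by omega)]
          have e2 : (g c).length + (K * j + i) - (g c).length = K * j + i := by omega
          rw [e2]
          exact ih (fun c hc => h c (by simp [hc])) j (by simpa using hj)

-- A's transpose of the per-row flat buffer equals B's component-major per-row loop
theorem row_eq (vertices : List (List Int)) (N R : Nat) (row : List Int)
    (hrect : N = 0 ∨ R = 0 ∨ row.length = R)
    (hblk : ∀ c ∈ row, (PySem.List.pyGet? vertices c).map List.length =
      some (if R = 0 then 0 else N)) :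
    transposeA (row.foldl (fun s col => s ++ PySem.List.pyGetD vertices col []) []) (N : Int) (R : Int) =
    (PySem.List.pyRange 0 (N : Int) 1).foldl (fun t i => (PySem.List.pyRange 0 (R : Int) 1).foldl
      (fun t j => t ++ [PySem.List.pyGetD (PySem.List.pyGetD vertices (PySem.List.pyGetD row j 0) []) i 0]) t) [] := by
  have hg : ∀ c ∈ row, ((fun c => PySem.List.pyGetD vertices c []) c).length = (if R = 0 then 0 else N) := by
    intro c hc
    rcases Option.map_eq_some_iff.mp (hblk c hc) with ⟨v, hv, hvlen⟩
    show (PySem.List.pyGetD vertices c []).length = _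
    have : PySem.List.pyGetD vertices c [] = v := by
      show (PySem.List.pyGet? vertices c).getD [] = v
      rw [hv]; rfl
    rw [this, hvlen]
  have hmat : row.foldl (fun s col => s ++ PySem.List.pyGetD vertices col []) [] =
      row.flatMap (fun c => PySem.List.pyGetD vertices c []) := by
    rw [PySem.List.foldl_append_eq_flatMap]; simp
  have hmatlen : (row.flatMap (fun c => PySem.List.pyGetD vertices c [])).length = R * N := by
    rw [length_flatMap_uniform _ _ _ hg]
    rcases hrect with h | h | h
    · subst h; by_cases hR : R = 0 <;> simp [hR]
    · subst h; simp
    · by_cases hR : R = 0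
      · subst hR; simp at h; simp [h]
      · rw [if_neg hR, h, Nat.mul_comm]
  rw [hmat]
  -- A side to Nat foldl form, then to the flatMap form
  unfold transposeA
  simp only [PySem.List.pyRange_one, Int.sub_zero, Int.toNat_natCast, List.foldl_map,
    zero_add, ← Nat.cast_mul, ← Nat.cast_add, PySem.List.pySetD_natCast,
    PySem.List.pyGetD_natCast, PySem.List.foldl_append_singleton_eq_map,
    PySem.List.foldl_append_eq_flatMap, List.nil_append]
  rw [fillOuter_eq_flatMap N R _ _ (by rw [List.length_replicate, hmatlen])]
  -- pointwise equality of the two flatMaps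
  apply List.flatMap_congr
  intro i hi
  apply List.map_congr_left
  intro j hj
  have hiN : i < N := List.mem_range.mp hi
  have hjR : j < R := List.mem_range.mp hj
  have hR0 : R ≠ 0 := by omega
  have hrow : row.length = R := by rcases hrect with h | h | h <;> omega
  have hg' : ∀ c ∈ row, ((fun c => PySem.List.pyGetD vertices c []) c).length = N := by
    intro c hc; rw [hg c hc, if_neg hR0]
  rw [getD_flatMap_uniform _ _ _ hg' j i (by omega) hiN,
    List.getD_eq_getElem row 0 (by omega)]

-- ===== VERDICT (by name: the statement is the Claim_ definition above) =====
theorem generate_simplices_spec : Claim_equal_generate_simplices := by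
  unfold Claim_equal_generate_simplices
  intro vertices config _ hpre
  unfold Spec_generate_simplices generate_simplices generate_simplices_alt
  rcases hpre with h | ⟨hv, hrows⟩
  · subst h; rfl
  · simp only [PySem.List.foldl_append_singleton_eq_map, List.nil_append]
    apply List.map_congr_left
    intro row hrow
    rw [row_eq vertices (vertices.headD []).length (config.headD []).length row
      (by rcases (hrows row hrow).1 with h | h | h <;> omega)
      (hrows row hrow).2]
    simp only [PySem.List.foldl_append_singleton_eq_map]
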